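-- pv_equiv track=rewrite | github.com/rohitrango/Implicit3DCNN | scripts/brats_finetune_segmentation.py | generate_patch_indices
-- ===== SOURCE A (Python) =====
-- def generate_patch_indices(H, W, D, patch_size):
--     """
--     Generate starting indices for patches of size patch_size x patch_size x patch_size
--     that cover the entire volume of size H x W x D.
--     """
--     indices = []
--     for h in range(0, H, patch_size):
--         for w in range(0, W, patch_size):
--             for d in range(0, D, patch_size):
--                 h_end = h + patch_size if h + patch_size <= H else H
--                 w_end = w + patch_size if w + patch_size <= W else W
--                 d_end = d + patch_size if d + patch_size <= D else D
--                 indices.append((h_end-patch_size, w_end-patch_size, d_end-patch_size))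
--
--     return indices
-- ===== SOURCE B (Python) =====
-- def generate_patch_indices(H, W, D, patch_size):
--     ps = patch_size
--     nh = max(0, -(-H // ps))
--     nw = max(0, -(-W // ps))
--     nd = max(0, -(-D // ps))
--     out = []
--     for i in range(nh * nw * nd):
--         hw, kd = divmod(i, nd)
--         kh, kw = divmod(hw, nw)
--         out.append((min(ps * kh, H - ps), min(ps * kw, W - ps), min(ps * kd, D - ps)))
--     return out
-- ===== Notes on version B (the rewrite author's own statement) =====
-- stated objective: alternative
-- what changed: Replaces the triple-nested loop by a single flat loop over one range of length nh*nw*nd, computing per-axis counts by ceiling division up front and decoding each flat index into (kh,kw,kd) with divmod before clamping.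
-- outside the precondition, e.g. on generate_patch_indices(4, 4, 4, 0): A raises ValueError, B raises ZeroDivisionError
import Mathlib
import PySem

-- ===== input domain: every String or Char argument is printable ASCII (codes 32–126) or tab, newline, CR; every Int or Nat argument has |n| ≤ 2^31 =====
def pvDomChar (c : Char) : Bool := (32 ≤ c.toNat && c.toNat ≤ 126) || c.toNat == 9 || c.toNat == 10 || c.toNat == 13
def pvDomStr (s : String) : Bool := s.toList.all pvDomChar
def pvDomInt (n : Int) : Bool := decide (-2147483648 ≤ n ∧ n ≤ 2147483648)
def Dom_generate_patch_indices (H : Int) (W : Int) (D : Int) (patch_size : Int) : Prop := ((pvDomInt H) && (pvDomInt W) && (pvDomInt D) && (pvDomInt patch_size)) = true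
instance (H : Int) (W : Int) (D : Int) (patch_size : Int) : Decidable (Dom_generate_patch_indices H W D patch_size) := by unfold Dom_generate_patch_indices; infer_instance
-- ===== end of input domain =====

-- B replaces A's triple-nested loop by one flat loop over a single range of length
-- nh*nw*nd (per-axis patch counts from ceiling division), decoding each flat index
-- with divmod before clamping (objective: alternative algorithm, same complexity).

-- ===== PORT A =====
def generate_patch_indices (H : Int) (W : Int) (D : Int) (patch_size : Int) : List (Int × Int × Int) :=
  (PySem.List.pyRange 0 H patch_size).foldl (fun acc h =>
    (PySem.List.pyRange 0 W patch_size).foldl (fun acc w =>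
      (PySem.List.pyRange 0 D patch_size).foldl (fun acc d =>
        acc ++ [((if h + patch_size ≤ H then h + patch_size else H) - patch_size,
                 (if w + patch_size ≤ W then w + patch_size else W) - patch_size,
                 (if d + patch_size ≤ D then d + patch_size else D) - patch_size)]) acc) acc) []

-- ===== PORT B =====
def generate_patch_indices_alt (H : Int) (W : Int) (D : Int) (patch_size : Int) : List (Int × Int × Int) :=
  let ps := patch_size
  let nh := max 0 (-(PySem.Int.floordiv (-H) ps))
  let nw := max 0 (-(PySem.Int.floordiv (-W) ps))
  let nd := max 0 (-(PySem.Int.floordiv (-D) ps))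
  (PySem.List.pyRange 0 (nh * nw * nd) 1).foldl (fun out i =>
    let hw := PySem.Int.floordiv i nd
    let kd := PySem.Int.mod i nd
    let kh := PySem.Int.floordiv hw nw
    let kw := PySem.Int.mod hw nw
    out ++ [(min (ps * kh) (H - ps), min (ps * kw) (W - ps), min (ps * kd) (D - ps))]) []

-- ===== PRECONDITION & SPEC =====
-- Pre_ excludes patch_size = 0, on which Python's range (A) / integer division (B) raises.
def Pre_generate_patch_indices (H : Int) (W : Int) (D : Int) (patch_size : Int) : Prop := patch_size ≠ 0
instance (H : Int) (W : Int) (D : Int) (patch_size : Int) : Decidable (Pre_generate_patch_indices H W D patch_size) := by unfold Pre_generate_patch_indices; infer_instance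
def pvWitness_generate_patch_indices : Int × Int × Int × Int := (5, 5, 4, 2)

def Spec_generate_patch_indices (H : Int) (W : Int) (D : Int) (patch_size : Int) (out : List (Int × Int × Int)) : Prop := out = generate_patch_indices_alt H W D patch_size
instance (H : Int) (W : Int) (D : Int) (patch_size : Int) (out : List (Int × Int × Int)) : Decidable (Spec_generate_patch_indices H W D patch_size out) := by unfold Spec_generate_patch_indices; infer_instance

-- ===== CLAIM (what is proved, stated in full; the proofs are below) =====
def Claim_equal_generate_patch_indices : Prop := ∀ (H : Int) (W : Int) (D : Int) (patch_size : Int), Dom_generate_patch_indices H W D patch_size → Pre_generate_patch_indices H W D patch_size → Spec_generate_patch_indices H W D patch_size (generate_patch_indices H W D patch_size)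

-- ===== LEMMAS AND PROOFS =====

-- A's clamped end minus patch_size is exactly a clamped min.
theorem pv_clamp_eq (X ps h : Int) :
    (if h + ps ≤ X then h + ps else X) - ps = min h (X - ps) := by
  rcases le_or_gt (h + ps) X with hle | hlt <;> simp [min_def] <;> omega

-- the length of range(0, X, ps) for 0 < ps, written as B's ceiling division.
theorem pv_ceil_count (X ps : Int) (hps : 0 < ps) :
    (if 0 < X then ((X + ps - 1) / ps).toNat else 0)
      = (max 0 (-(PySem.Int.floordiv (-X) ps))).toNat := by
  have hc := (PySem.Int.neg_floordiv_neg_eq_iff_of_pos (a := X)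
      (q := -(PySem.Int.floordiv (-X) ps)) hps).mp rfl
  by_cases hX : 0 < X
  · have hc1 : 1 ≤ -(PySem.Int.floordiv (-X) ps) := by nlinarith [hc.1, hc.2]
    have he : (X + ps - 1) / ps = -(PySem.Int.floordiv (-X) ps) := by
      rw [← PySem.Int.floordiv_eq_ediv_of_pos hps,
        PySem.Int.floordiv_eq_iff_of_pos hps]
      constructor <;> nlinarith [hc.1, hc.2]
    simp [hX, he, max_eq_right (le_trans zero_le_one hc1)]
  · have : -(PySem.Int.floordiv (-X) ps) ≤ 0 := by
      rw [PySem.Int.floordiv_eq_ediv_of_pos hps]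
      have : (0:Int) ≤ (-X) / ps := Int.ediv_nonneg (by omega) (le_of_lt hps)
      omega
    simp [hX]
    omega

-- range(0, X, ps) as a mapped List.range with B's count, any ps ≠ 0.
theorem pv_pyRange_closed (X ps : Int) (hps : ps ≠ 0) :
    PySem.List.pyRange 0 X ps
      = (List.range (max 0 (-(PySem.Int.floordiv (-X) ps))).toNat).map
          (fun k : Nat => ps * (k : Int)) := by
  rcases lt_trichotomy ps 0 with h | h' | h
  · rw [PySem.List.pyRange_of_neg _ _ h]
    have h' : 0 < -ps := by omega
    have hcc := pv_ceil_count (-X) (-ps) h'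
    rw [PySem.Int.floordiv_neg_neg] at hcc
    have hc : (if X < 0 then ((0 - X + -ps - 1) / -ps).toNat else 0)
        = (max 0 (-(PySem.Int.floordiv (-X) ps))).toNat := by
      rw [← hcc]
      by_cases hx : X < 0
      · rw [if_pos hx, if_pos (by omega : (0:Int) < -X),
          show (0:Int) - X = -X by ring]
      · rw [if_neg hx, if_neg (by omega : ¬ (0:Int) < -X)]
    rw [hc]
    apply List.map_congr_left
    intro k _
    rw [zero_add]
  · exact absurd h' hps
  · rw [PySem.List.pyRange_of_pos _ _ h]
    have hc : (if (0:Int) < X then ((X - 0 + ps - 1) / ps).toNat else 0)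
        = (max 0 (-(PySem.Int.floordiv (-X) ps))).toNat := by
      rw [show X - 0 = X by ring]
      exact pv_ceil_count X ps h
    rw [hc]
    apply List.map_congr_left
    intro k _
    rw [zero_add]

-- flatMap of singletons is map.
theorem pv_flatMap_singleton {α : Type} (l : List Nat) (g : Nat → α) :
    l.flatMap (fun x => [g x]) = l.map g := by
  induction l with
  | nil => rfl
  | cons a t ih => simp [ih]

-- decoding a flat index over range (m*n) with divmod-by-n is the nested enumeration.
theorem pv_range_split {α : Type} (m n : Nat) (F : Nat → Nat → List α) :
    (List.range (m * n)).flatMap (fun i => F (i / n) (i % n))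
      = (List.range m).flatMap (fun q => (List.range n).flatMap (fun r => F q r)) := by
  rcases Nat.eq_zero_or_pos n with hn | hn
  · subst hn; simp
  · induction m with
    | zero => simp
    | succ m ih =>
      have hmn : (m + 1) * n = m * n + n := by ring
      rw [hmn, List.range_add, List.flatMap_append, ih, List.range_succ,
        List.flatMap_append]
      congr 1
      rw [List.flatMap_map]
      simp only [List.flatMap_cons, List.flatMap_nil, List.append_nil]
      rw [List.flatMap_def, List.flatMap_def]
      congr 1
      apply List.map_congr_left
      intro r hr
      have hrn := List.mem_range.mp hr
      have h1 : (m * n + r) / n = m := by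
        rw [Nat.add_comm, Nat.add_mul_div_right _ _ hn, Nat.div_eq_of_lt hrn]
        exact Nat.zero_add m
      have h2 : (m * n + r) % n = r := by
        rw [Nat.add_comm, Nat.add_mul_mod_self_right, Nat.mod_eq_of_lt hrn]
      simp [h1, h2]

theorem pv_range_split_map {α : Type} (m n : Nat) (f : Nat → Nat → α) :
    (List.range (m * n)).map (fun i => f (i / n) (i % n))
      = (List.range m).flatMap (fun q => (List.range n).map (fun r => f q r)) := by
  rw [← pv_flatMap_singleton (List.range (m * n)) (fun i => f (i / n) (i % n)),
    pv_range_split m n (fun q r => [f q r])]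
  simp only [pv_flatMap_singleton]

-- ===== VERDICT (by name: the statement is the Claim_ definition above) =====
theorem generate_patch_indices_spec : Claim_equal_generate_patch_indices := by
  intro H W D ps _ hps
  unfold Spec_generate_patch_indices generate_patch_indices generate_patch_indices_alt
  obtain ⟨a, ha⟩ : ∃ a : Nat, max 0 (-(PySem.Int.floordiv (-H) ps)) = (a : Int) :=
    ⟨_, (Int.toNat_of_nonneg (le_max_left _ _)).symm⟩
  obtain ⟨b, hb⟩ : ∃ b : Nat, max 0 (-(PySem.Int.floordiv (-W) ps)) = (b : Int) :=
    ⟨_, (Int.toNat_of_nonneg (le_max_left _ _)).symm⟩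
  obtain ⟨c, hc⟩ : ∃ c : Nat, max 0 (-(PySem.Int.floordiv (-D) ps)) = (c : Int) :=
    ⟨_, (Int.toNat_of_nonneg (le_max_left _ _)).symm⟩
  simp only [pv_clamp_eq, PySem.List.foldl_append_singleton_eq_map,
    PySem.List.foldl_append_eq_flatMap, List.nil_append]
  rw [pv_pyRange_closed H ps hps, pv_pyRange_closed W ps hps, pv_pyRange_closed D ps hps,
    PySem.List.pyRange_one, ha, hb, hc]
  simp only [sub_zero, List.flatMap_map, List.map_map, zero_add,
    ← Int.natCast_mul, Int.toNat_natCast]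
  have hpt : ∀ i ∈ List.range (a * b * c),
      ((fun x => (min (ps * PySem.Int.floordiv (PySem.Int.floordiv x (c : Int)) (b : Int)) (H - ps),
                  min (ps * PySem.Int.mod (PySem.Int.floordiv x (c : Int)) (b : Int)) (W - ps),
                  min (ps * PySem.Int.mod x (c : Int)) (D - ps))) ∘ (fun k : Nat => (k : Int))) i
        = (min (ps * ((i / c / b : Nat) : Int)) (H - ps),
           min (ps * ((i / c % b : Nat) : Int)) (W - ps),
           min (ps * ((i % c : Nat) : Int)) (D - ps)) := by
    intro i _
    simp only [Function.comp_apply, PySem.Int.floordiv_natCast, PySem.Int.mod_natCast]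
  rw [List.map_congr_left hpt,
    pv_range_split_map (a * b) c
      (fun hw kd => (min (ps * ((hw / b : Nat) : Int)) (H - ps),
                     min (ps * ((hw % b : Nat) : Int)) (W - ps),
                     min (ps * ((kd : Nat) : Int)) (D - ps))),
    pv_range_split a b
      (fun q r => (List.range c).map
        (fun kd => (min (ps * ((q : Nat) : Int)) (H - ps),
                    min (ps * ((r : Nat) : Int)) (W - ps),
                    min (ps * ((kd : Nat) : Int)) (D - ps))))]
  simp only [Function.comp_def]
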